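-- pv_equiv track=rewrite | github.com/cry999/AtCoder | beginner/088/C.py | takahashis_information
-- ===== SOURCE A (Python) =====
-- def takahashis_information(C: list) -> bool:
--     for a1 in range(C[0][0] + 1):
--         b1 = C[0][0] - a1
--         b2 = C[0][1] - a1
--         b3 = C[0][2] - a1
--
--         if b1 < 0 or b2 < 0 or b3 < 0:
--             continue
--
--         # check a2
--         if C[1][0] - b1 != C[1][1] - b2:
--             continue
--         if C[1][1] - b2 != C[1][2] - b3:
--             continue
--
--         # check a3
--         if C[2][0] - b1 != C[2][1] - b2:
--             continue
--         if C[2][1] - b2 != C[2][2] - b3: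
--             continue
--
--         return True
--
--     return False
-- ===== SOURCE B (Python) =====
-- def takahashis_information(C: list) -> bool:
--     # A's row-consistency checks do not depend on a1, and a1 = 0 is the
--     # least constraining choice, so such an a1 exists iff the column offsets match
--     # row 0 and all of row 0 is nonnegative.
--     if min(C[0][0], C[0][1], C[0][2]) < 0:
--         return False
--     return (C[1][0] - C[0][0] == C[1][1] - C[0][1] == C[1][2] - C[0][2]
--             and C[2][0] - C[0][0] == C[2][1] - C[0][1] == C[2][2] - C[0][2])
-- ===== Notes on version B (the rewrite author's own statement) =====
-- stated objective: simpler
-- what changed: Replaces the loop over all candidate a1 values by loop-free checks: row-0 nonnegativity plus a1-independent column-offset consistency of rows 1 and 2 against row 0.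
-- outside the precondition, e.g. on takahashis_information([[-1]]): A returns False, B raises IndexError
import Mathlib
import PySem

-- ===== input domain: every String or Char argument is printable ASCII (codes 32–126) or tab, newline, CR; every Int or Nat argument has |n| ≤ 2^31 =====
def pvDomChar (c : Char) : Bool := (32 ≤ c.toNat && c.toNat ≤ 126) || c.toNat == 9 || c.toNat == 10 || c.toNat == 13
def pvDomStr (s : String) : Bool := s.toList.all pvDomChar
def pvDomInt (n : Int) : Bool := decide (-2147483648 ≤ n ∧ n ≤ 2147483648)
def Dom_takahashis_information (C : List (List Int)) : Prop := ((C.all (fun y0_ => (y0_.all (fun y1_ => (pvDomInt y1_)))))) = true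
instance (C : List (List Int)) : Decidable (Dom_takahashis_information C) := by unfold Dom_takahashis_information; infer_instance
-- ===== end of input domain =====

-- B replaces A's loop over candidate a1 values by loop-free a1-independent checks (nonnegative row 0 + column-offset consistency of rows 1 and 2); equivalence proved inside Pre_.


-- ===== PORT A =====
-- C[i][j]; Python raises IndexError out of range — Pre_ guarantees the indices are in range, the default is never used there
def pvCell (C : List (List Int)) (i j : Int) : Int :=
  PySem.List.pyGetD (PySem.List.pyGetD C i []) j 0

-- the 'for a1 in range(...)' loop of A, element by element; 'continue' = recurse, fall-through = return True
def pvLoopA (C : List (List Int)) : List Int → Bool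
  | [] => false
  | a1 :: rest =>
    let b1 := pvCell C 0 0 - a1
    let b2 := pvCell C 0 1 - a1
    let b3 := pvCell C 0 2 - a1
    if b1 < 0 ∨ b2 < 0 ∨ b3 < 0 then pvLoopA C rest
    else if pvCell C 1 0 - b1 ≠ pvCell C 1 1 - b2 then pvLoopA C rest
    else if pvCell C 1 1 - b2 ≠ pvCell C 1 2 - b3 then pvLoopA C rest
    else if pvCell C 2 0 - b1 ≠ pvCell C 2 1 - b2 then pvLoopA C rest
    else if pvCell C 2 1 - b2 ≠ pvCell C 2 2 - b3 then pvLoopA C rest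
    else true

def takahashis_information (C : List (List Int)) : Bool :=
  pvLoopA C (PySem.List.pyRange 0 (pvCell C 0 0 + 1) 1)

-- ===== PORT B =====
def takahashis_information_alt (C : List (List Int)) : Bool :=
  if min (pvCell C 0 0) (min (pvCell C 0 1) (pvCell C 0 2)) < 0 then false
  else decide (pvCell C 1 0 - pvCell C 0 0 = pvCell C 1 1 - pvCell C 0 1
             ∧ pvCell C 1 1 - pvCell C 0 1 = pvCell C 1 2 - pvCell C 0 2
             ∧ pvCell C 2 0 - pvCell C 0 0 = pvCell C 2 1 - pvCell C 0 1
             ∧ pvCell C 2 1 - pvCell C 0 1 = pvCell C 2 2 - pvCell C 0 2)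

-- ===== PRECONDITION & SPEC =====
-- Pre_ excludes the inputs on which A raises IndexError, and the degenerate inputs (row 0 shorter
-- than 3 with C[0][0] < 0) on which A returns False from an empty range before indexing a missing
-- cell while B's row-0 accesses raise IndexError; it mirrors exactly which cells the two programs
-- read before returning (both short-circuit at the same a1-independent mismatch).
def Pre_takahashis_information (C : List (List Int)) : Prop :=
  1 ≤ C.length ∧ 3 ≤ (C.getD 0 []).length ∧
    (min (pvCell C 0 0) (min (pvCell C 0 1) (pvCell C 0 2)) < 0
      ∨ (2 ≤ C.length ∧ 2 ≤ (C.getD 1 []).length ∧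
          (pvCell C 1 0 - pvCell C 0 0 ≠ pvCell C 1 1 - pvCell C 0 1
            ∨ (3 ≤ (C.getD 1 []).length ∧
                (pvCell C 1 1 - pvCell C 0 1 ≠ pvCell C 1 2 - pvCell C 0 2
                  ∨ (3 ≤ C.length ∧ 2 ≤ (C.getD 2 []).length ∧
                      (pvCell C 2 0 - pvCell C 0 0 ≠ pvCell C 2 1 - pvCell C 0 1
                        ∨ 3 ≤ (C.getD 2 []).length)))))))
instance (C : List (List Int)) : Decidable (Pre_takahashis_information C) := by
  unfold Pre_takahashis_information; infer_instance
def pvWitness_takahashis_information : List (List Int) :=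
  [[2, 3, 4], [3, 4, 5], [1, 2, 3]]
def Spec_takahashis_information (C : List (List Int)) (out : Bool) : Prop := out = takahashis_information_alt C
instance (C : List (List Int)) (out : Bool) : Decidable (Spec_takahashis_information C out) := by unfold Spec_takahashis_information; infer_instance

-- ===== CLAIM (what is proved, stated in full; the proofs are below) =====
def Claim_equal_takahashis_information : Prop := ∀ (C : List (List Int)), Dom_takahashis_information C → Pre_takahashis_information C → Spec_takahashis_information C (takahashis_information C)

-- ===== LEMMAS AND PROOFS =====

-- if the a1-independent consistency checks fail, or row 0 has a negative entry past index 0,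
-- the loop body 'continue's on every nonnegative a1, so the loop returns False.
lemma pvLoopA_false (C : List (List Int)) (l : List Int)
    (h : ∀ a1 ∈ l, 0 ≤ a1)
    (hfail : ¬(pvCell C 1 0 - pvCell C 0 0 = pvCell C 1 1 - pvCell C 0 1
             ∧ pvCell C 1 1 - pvCell C 0 1 = pvCell C 1 2 - pvCell C 0 2
             ∧ pvCell C 2 0 - pvCell C 0 0 = pvCell C 2 1 - pvCell C 0 1
             ∧ pvCell C 2 1 - pvCell C 0 1 = pvCell C 2 2 - pvCell C 0 2)
          ∨ pvCell C 0 1 < 0 ∨ pvCell C 0 2 < 0) :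
    pvLoopA C l = false := by
  induction l with
  | nil => rfl
  | cons a1 rest ih =>
    have ha1 : 0 ≤ a1 := h a1 (List.mem_cons_self)
    have ih' := ih (fun x hx => h x (List.mem_cons_of_mem _ hx))
    simp only [pvLoopA]
    split_ifs with h1 h2 h3 h4 h5
    · exact ih'
    · exact ih'
    · exact ih'
    · exact ih'
    · exact ih'
    · exfalso
      rcases hfail with hc | hneg | hneg
      · exact hc (by omega)
      · omega
      · omega

theorem takahashis_information_spec : Claim_equal_takahashis_information := by
  intro C _ _
  unfold Spec_takahashis_information takahashis_information takahashis_information_alt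
  by_cases hpos : 0 ≤ pvCell C 0 0 ∧ 0 ≤ pvCell C 0 1 ∧ 0 ≤ pvCell C 0 2
  · by_cases hc : pvCell C 1 0 - pvCell C 0 0 = pvCell C 1 1 - pvCell C 0 1
             ∧ pvCell C 1 1 - pvCell C 0 1 = pvCell C 1 2 - pvCell C 0 2
             ∧ pvCell C 2 0 - pvCell C 0 0 = pvCell C 2 1 - pvCell C 0 1
             ∧ pvCell C 2 1 - pvCell C 0 1 = pvCell C 2 2 - pvCell C 0 2
    · -- both sides are true: a1 = 0, the first element of the range, already succeeds
      rw [if_neg (by omega), decide_eq_true hc, PySem.List.pyRange_one_cons (by omega)]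
      simp only [pvLoopA]
      split_ifs <;> first | rfl | omega
    · -- the a1-independent consistency checks fail on every iteration: both sides false
      rw [pvLoopA_false C _ (fun x hx => ((PySem.List.mem_pyRange_one).mp hx).1) (Or.inl hc)]
      split_ifs
      · rfl
      · exact (decide_eq_false hc).symm
  · -- some entry of row 0 is negative: both sides false
    rw [if_pos (by omega)]
    by_cases h00 : pvCell C 0 0 < 0
    · rw [PySem.List.pyRange_one_eq_nil (by omega)]
      rfl
    · exact pvLoopA_false C _ (fun x hx => ((PySem.List.mem_pyRange_one).mp hx).1) (by omega)
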